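-- pv_equiv track=rewrite | github.com/yeongseon/excel-dbapi | src/excel_dbapi/engines/graph/backend.py | _find_deleted_row_indices
-- ===== SOURCE A (Python) =====
-- from typing import Any, cast
--
-- def _find_deleted_row_indices(
--     old_rows: list[list[Any]], new_rows: list[list[Any]]
-- ) -> list[int]:
--     """Return old-row indexes removed from old_rows to form new_rows."""
--     deleted: list[int] = []
--     old_idx = 0
--     new_idx = 0
--     while old_idx < len(old_rows) and new_idx < len(new_rows):
--         if old_rows[old_idx] == new_rows[new_idx]:
--             old_idx += 1
--             new_idx += 1
--             continue
--         deleted.append(old_idx)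
--         old_idx += 1
--     if new_idx != len(new_rows):
--         return []
--     while old_idx < len(old_rows):
--         deleted.append(old_idx)
--         old_idx += 1
--     return deleted
-- ===== SOURCE B (Python) =====
-- def _find_deleted_row_indices(
--     old_rows: list[list], new_rows: list[list]
-- ) -> list[int]:
--     """Return old-row indexes removed from old_rows to form new_rows."""
--     matched: list[int] = []
--     start = 0
--     for row in new_rows:
--         try:
--             start = old_rows.index(row, start)
--         except ValueError:
--             return []
--         matched.append(start)
--         start += 1
--     return [i for i in range(len(old_rows)) if i not in matched]
-- ===== Notes on version B (the rewrite author's own statement) =====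
-- stated objective: alternative
-- what changed: Instead of A's two-pointer walk over old_rows that appends mismatch indices plus a trailing while-loop, B iterates over new_rows, locating each new row with list.index(row, start) (early return [] on ValueError), collects the matched positions, and returns their complement over range(len(old_rows)).
import Mathlib
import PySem

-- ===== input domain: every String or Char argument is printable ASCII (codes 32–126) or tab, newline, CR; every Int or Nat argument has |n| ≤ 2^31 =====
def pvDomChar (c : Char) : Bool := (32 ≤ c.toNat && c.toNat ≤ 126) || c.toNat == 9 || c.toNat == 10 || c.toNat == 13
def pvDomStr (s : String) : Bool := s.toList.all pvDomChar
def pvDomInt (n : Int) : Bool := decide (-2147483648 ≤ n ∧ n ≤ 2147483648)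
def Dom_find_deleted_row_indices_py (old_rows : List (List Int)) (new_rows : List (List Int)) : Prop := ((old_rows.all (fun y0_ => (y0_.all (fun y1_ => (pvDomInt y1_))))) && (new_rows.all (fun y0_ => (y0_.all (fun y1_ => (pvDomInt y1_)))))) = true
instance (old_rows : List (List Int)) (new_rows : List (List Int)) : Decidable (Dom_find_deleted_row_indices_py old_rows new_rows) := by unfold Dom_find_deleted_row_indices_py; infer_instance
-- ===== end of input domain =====

-- B drives the loop over new_rows, locating each new row in old_rows with list.index(row, start)
-- and returning the complement of the matched positions over range(len(old_rows)) (objective: alternative).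

-- ===== PORT A =====
-- first while-loop of A: two cursors, appending mismatched old indices
def aLoop1 (old_rows new_rows : List (List Int)) (old_idx new_idx : Nat) (deleted : List Int) :
    List Int × Nat × Nat :=
  if h : old_idx < old_rows.length ∧ new_idx < new_rows.length then
    if old_rows[old_idx]'h.1 = new_rows[new_idx]'h.2 then
      aLoop1 old_rows new_rows (old_idx + 1) (new_idx + 1) deleted
    else
      aLoop1 old_rows new_rows (old_idx + 1) new_idx (deleted ++ [(old_idx : Int)])
  else (deleted, old_idx, new_idx)
termination_by old_rows.length - old_idx
decreasing_by all_goals omega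

-- second (trailing) while-loop of A
def aLoop2 (old_rows : List (List Int)) (old_idx : Nat) (deleted : List Int) : List Int :=
  if old_idx < old_rows.length then aLoop2 old_rows (old_idx + 1) (deleted ++ [(old_idx : Int)])
  else deleted
termination_by old_rows.length - old_idx
decreasing_by omega

def find_deleted_row_indices_py (old_rows : List (List Int)) (new_rows : List (List Int)) : List Int :=
  let r := aLoop1 old_rows new_rows 0 0 []
  if r.2.2 ≠ new_rows.length then [] else aLoop2 old_rows r.2.1 r.1

-- ===== PORT B =====
-- Python old_rows.index(row, start): first index ≥ start holding row; none = ValueError (hand port, exact)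
def bIndexFrom (xs : List (List Int)) (v : List Int) (i : Nat) : Option Nat :=
  if h : i < xs.length then
    if xs[i] = v then some i else bIndexFrom xs v (i + 1)
  else none
termination_by xs.length - i
decreasing_by omega

-- B's for-loop over new_rows: state (matched, start); none = the early 'return []' on ValueError
def bLoop (old_rows : List (List Int)) : List (List Int) → List Int → Nat → Option (List Int)
  | [], matched, _ => some matched
  | row :: rest, matched, start =>
      match bIndexFrom old_rows row start with
      | none => none
      | some pos => bLoop old_rows rest (matched ++ [(pos : Int)]) (pos + 1)

def find_deleted_row_indices_py_alt (old_rows : List (List Int)) (new_rows : List (List Int)) : List Int :=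
  match bLoop old_rows new_rows [] 0 with
  | none => []
  | some matched =>
      (PySem.List.pyRange 0 (old_rows.length : Int) 1).filter (fun i => !(matched.contains i))

-- ===== PRECONDITION & SPEC =====
def Spec_find_deleted_row_indices_py (old_rows : List (List Int)) (new_rows : List (List Int)) (out : List Int) : Prop := out = find_deleted_row_indices_py_alt old_rows new_rows
instance (old_rows : List (List Int)) (new_rows : List (List Int)) (out : List Int) : Decidable (Spec_find_deleted_row_indices_py old_rows new_rows out) := by unfold Spec_find_deleted_row_indices_py; infer_instance

-- ===== CLAIM (what is proved, stated in full; the proofs are below) =====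
def Claim_equal_find_deleted_row_indices_py : Prop := ∀ (old_rows : List (List Int)) (new_rows : List (List Int)), Dom_find_deleted_row_indices_py old_rows new_rows → Spec_find_deleted_row_indices_py old_rows new_rows (find_deleted_row_indices_py old_rows new_rows)

-- ===== LEMMAS AND PROOFS =====

-- common greedy spec: flags (true = matched) for each old row, and the unconsumed new rows
def mf : List (List Int) → List (List Int) → List Bool × List (List Int)
  | [], ns => ([], ns)
  | _ :: os, [] => let p := mf os []; (false :: p.1, p.2)
  | o :: os, n :: ns =>
      if o = n then let p := mf os ns; (true :: p.1, p.2)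
      else let p := mf os (n :: ns); (false :: p.1, p.2)

-- indices (from k) at which the flag is false
def fIdx : List Bool → Int → List Int
  | [], _ => []
  | true :: fs, k => fIdx fs (k + 1)
  | false :: fs, k => k :: fIdx fs (k + 1)

-- indices (from k) at which the flag is true
def tIdx : List Bool → Int → List Int
  | [], _ => []
  | true :: fs, k => k :: tIdx fs (k + 1)
  | false :: fs, k => tIdx fs (k + 1)

theorem mf_fst_len : ∀ os ns : List (List Int), ((mf os ns).1).length = os.length := by
  intro os
  induction os with
  | nil => intro ns; simp [mf]
  | cons o os ih =>
    intro ns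
    cases ns with
    | nil => simpa [mf] using ih []
    | cons n ns =>
      by_cases h : o = n
      · simpa [mf, if_pos h] using ih ns
      · simpa [mf, if_neg h] using ih (n :: ns)

theorem mf_nil : ∀ os : List (List Int), mf os [] = (List.replicate os.length false, []) := by
  intro os
  induction os with
  | nil => simp [mf]
  | cons o os ih => simp [mf, ih, List.replicate_succ]

theorem aLoop2_eq (old_rows : List (List Int)) :
    ∀ (old_idx : Nat) (deleted : List Int),
      aLoop2 old_rows old_idx deleted =
        deleted ++ fIdx (List.replicate (old_rows.length - old_idx) false) (old_idx : Int) := by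
  intro oi
  induction hk : old_rows.length - oi using Nat.strong_induction_on generalizing oi with
  | _ k ih =>
    intro del
    rw [aLoop2]
    by_cases h : oi < old_rows.length
    · rw [if_pos h]
      have hk1 : old_rows.length - oi = (old_rows.length - (oi + 1)) + 1 := by omega
      rw [ih (old_rows.length - (oi + 1)) (by omega) (oi + 1) rfl]
      rw [← hk, hk1, List.replicate_succ]
      simp [fIdx]
    · rw [if_neg h]
      have hk0 : k = 0 := by omega
      simp [hk0, fIdx]

theorem aLoop_eq (old_rows new_rows : List (List Int)) :
    ∀ (os ns : List (List Int)) (oi ni : Nat) (del : List Int),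
      oi ≤ old_rows.length → old_rows.drop oi = os →
      ni ≤ new_rows.length → new_rows.drop ni = ns →
      (if (aLoop1 old_rows new_rows oi ni del).2.2 ≠ new_rows.length then ([] : List Int)
       else aLoop2 old_rows (aLoop1 old_rows new_rows oi ni del).2.1
              (aLoop1 old_rows new_rows oi ni del).1)
        = if (mf os ns).2 ≠ [] then [] else del ++ fIdx (mf os ns).1 (oi : Int) := by
  intro os
  induction os with
  | nil =>
    intro ns oi ni del hoi hdo hni hdn
    have hoe : oi = old_rows.length := by
      have := List.drop_eq_nil_iff.mp hdo; omega
    rw [aLoop1, dif_neg (by omega)]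
    cases ns with
    | nil =>
      have hne : ni = new_rows.length := by
        have := List.drop_eq_nil_iff.mp hdn; omega
      simp only [mf, hne, ne_eq, not_true_eq_false, if_false]
      rw [aLoop2, if_neg (by omega)]
      simp [fIdx]
    | cons n ns' =>
      have : ni < new_rows.length := by
        by_contra hc
        have : new_rows.drop ni = [] := List.drop_eq_nil_iff.mpr (by omega)
        rw [this] at hdn; exact (List.cons_ne_nil n ns') hdn.symm
      simp only [mf]
      rw [if_pos (by omega), if_pos (by simp)]
  | cons o os' ih =>
    intro ns oi ni del hoi hdo hni hdn
    have hol : oi < old_rows.length := by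
      by_contra hc
      have : old_rows.drop oi = [] := List.drop_eq_nil_iff.mpr (by omega)
      rw [this] at hdo; exact (List.cons_ne_nil o os') hdo.symm
    have hdo' : old_rows.drop oi = old_rows[oi] :: old_rows.drop (oi + 1) :=
      List.drop_eq_getElem_cons hol
    rw [hdo'] at hdo
    have hoo : old_rows[oi] = o := (List.cons.injEq _ _ _ _).mp hdo |>.1
    have hdro : old_rows.drop (oi + 1) = os' := (List.cons.injEq _ _ _ _).mp hdo |>.2
    cases ns with
    | nil =>
      have hne : ni = new_rows.length := by
        have := List.drop_eq_nil_iff.mp hdn; omega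
      rw [aLoop1, dif_neg (by omega)]
      rw [mf_nil]
      have h1 : ¬(((del, oi, ni) : List Int × Nat × Nat).2.2 ≠ new_rows.length) := by
        simp [hne]
      rw [if_neg h1, if_neg (by simp)]
      rw [aLoop2_eq]
      have hd2 : old_rows.drop oi = o :: os' := by rw [hdo', hoo, hdro]
      have hlen2 : old_rows.length - oi = os'.length + 1 := by
        have := congrArg List.length hd2
        simp at this
        omega
      rw [hlen2]
      simp
    | cons n ns' =>
      have hnl : ni < new_rows.length := by
        by_contra hc
        have : new_rows.drop ni = [] := List.drop_eq_nil_iff.mpr (by omega)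
        rw [this] at hdn; exact (List.cons_ne_nil n ns') hdn.symm
      have hdn' : new_rows.drop ni = new_rows[ni] :: new_rows.drop (ni + 1) :=
        List.drop_eq_getElem_cons hnl
      rw [hdn'] at hdn
      have hnn : new_rows[ni] = n := (List.cons.injEq _ _ _ _).mp hdn |>.1
      have hdrn : new_rows.drop (ni + 1) = ns' := (List.cons.injEq _ _ _ _).mp hdn |>.2
      rw [aLoop1, dif_pos ⟨hol, hnl⟩]
      have hcast : ((oi + 1 : Nat) : Int) = (oi : Int) + 1 := by push_cast; ring
      by_cases heq : o = n
      · rw [hoo, hnn, if_pos heq]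
        rw [ih ns' (oi + 1) (ni + 1) del (by omega) hdro (by omega) hdrn]
        simp only [mf, if_pos heq]
        rw [hcast]
        have hf : fIdx (true :: (mf os' ns').1) (oi : Int)
            = fIdx (mf os' ns').1 ((oi : Int) + 1) := rfl
        rw [hf]
      · rw [hoo, hnn, if_neg heq]
        rw [ih (n :: ns') (oi + 1) ni (del ++ [(oi : Int)]) (by omega) hdro (by omega)
          (by rw [hdn', hnn, hdrn])]
        simp only [mf, if_neg heq]
        rw [hcast]
        have hf : fIdx (false :: (mf os' (n :: ns')).1) (oi : Int)
            = (oi : Int) :: fIdx (mf os' (n :: ns')).1 ((oi : Int) + 1) := rfl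
        rw [hf]
        by_cases hr : (mf os' (n :: ns')).2 = []
        · simp [hr]
        · simp [hr]

-- B-side lemmas

theorem tIdx_replicate_false : ∀ (m : Nat) (k : Int), tIdx (List.replicate m false) k = [] := by
  intro m
  induction m with
  | zero => intro k; simp [tIdx]
  | succ m ih => intro k; simp [List.replicate_succ, tIdx, ih]

theorem tIdx_prefix : ∀ (m : Nat) (fs : List Bool) (k : Int),
    tIdx (List.replicate m false ++ true :: fs) k = (k + m) :: tIdx fs (k + m + 1) := by
  intro m
  induction m with
  | zero => intro fs k; simp [tIdx]
  | succ m ih =>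
    intro fs k
    rw [List.replicate_succ]
    have : tIdx (false :: (List.replicate m false ++ true :: fs)) k
        = tIdx (List.replicate m false ++ true :: fs) (k + 1) := rfl
    rw [List.cons_append, this, ih]
    congr 1
    · push_cast; ring
    · congr 1
      push_cast; ring

theorem tIdx_mem_ge : ∀ (fs : List Bool) (k i : Int), i ∈ tIdx fs k → k ≤ i := by
  intro fs
  induction fs with
  | nil => intro k i h; simp [tIdx] at h
  | cons b fs ih =>
    intro k i h
    cases b with
    | true =>
      rcases (List.mem_cons.mp h) with h1 | h2
      · omega
      · have := ih (k + 1) i h2; omega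
    | false =>
      have := ih (k + 1) i h; omega

-- scan lemma: bIndexFrom versus mf's skipping of unmatched old rows
theorem scan_eq (old_rows : List (List Int)) (n : List Int) (ns : List (List Int)) :
    ∀ (c : Nat), c ≤ old_rows.length →
      (bIndexFrom old_rows n c = none →
        mf (old_rows.drop c) (n :: ns) = (List.replicate (old_rows.length - c) false, n :: ns)) ∧
      (∀ k, bIndexFrom old_rows n c = some k → c ≤ k ∧ k < old_rows.length ∧ k + 1 ≤ old_rows.length ∧
        (mf (old_rows.drop c) (n :: ns)).1
          = List.replicate (k - c) false ++ true :: (mf (old_rows.drop (k + 1)) ns).1 ∧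
        (mf (old_rows.drop c) (n :: ns)).2 = (mf (old_rows.drop (k + 1)) ns).2) := by
  intro c
  induction hm : old_rows.length - c using Nat.strong_induction_on generalizing c with
  | _ m ih =>
    intro hc
    subst hm
    by_cases h : c < old_rows.length
    · have hd : old_rows.drop c = old_rows[c] :: old_rows.drop (c + 1) :=
        List.drop_eq_getElem_cons h
      by_cases he : old_rows[c] = n
      · constructor
        · intro hnone
          rw [bIndexFrom, dif_pos h, if_pos he] at hnone
          exact absurd hnone (by simp)
        · intro k hk
          rw [bIndexFrom, dif_pos h, if_pos he] at hk
          have hkc : k = c := by simpa using hk.symm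
          subst hkc
          refine ⟨le_refl _, h, by omega, ?_, ?_⟩
          · rw [hd]
            simp only [mf, if_pos he]
            simp
          · rw [hd]
            simp only [mf, if_pos he]
      · have hrec := ih (old_rows.length - (c + 1)) (by omega) (c + 1) rfl (by omega)
        constructor
        · intro hnone
          rw [bIndexFrom, dif_pos h, if_neg he] at hnone
          have := hrec.1 hnone
          rw [hd]
          simp only [mf, if_neg he]
          rw [this]
          have : old_rows.length - c = (old_rows.length - (c + 1)) + 1 := by omega
          rw [this, List.replicate_succ]
        · intro k hk
          rw [bIndexFrom, dif_pos h, if_neg he] at hk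
          obtain ⟨h1, h2, h3, h4, h5⟩ := hrec.2 k hk
          refine ⟨by omega, h2, h3, ?_, ?_⟩
          · rw [hd]
            simp only [mf, if_neg he]
            rw [h4]
            have : k - c = (k - (c + 1)) + 1 := by omega
            rw [this, List.replicate_succ]
            simp
          · rw [hd]
            simp only [mf, if_neg he]
            exact h5
    · have hce : c = old_rows.length := by omega
      constructor
      · intro _
        have h0 : old_rows.length - c = 0 := by omega
        rw [List.drop_eq_nil_iff.mpr (by omega), h0]
        simp [mf]
      · intro k hk
        rw [bIndexFrom, dif_neg (by omega)] at hk
        exact absurd hk (by simp)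

-- loop lemma: bLoop computes the true-flag positions of mf, or none if new rows remain
theorem bLoop_eq (old_rows : List (List Int)) :
    ∀ (ns : List (List Int)) (matched : List Int) (c : Nat), c ≤ old_rows.length →
      bLoop old_rows ns matched c =
        if (mf (old_rows.drop c) ns).2 = []
        then some (matched ++ tIdx (mf (old_rows.drop c) ns).1 (c : Int)) else none := by
  intro ns
  induction ns with
  | nil =>
    intro matched c hc
    rw [mf_nil]
    simp [bLoop, tIdx_replicate_false]
  | cons n ns ih =>
    intro matched c hc
    have hs := scan_eq old_rows n ns c hc
    cases hidx : bIndexFrom old_rows n c with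
    | none =>
      have := hs.1 hidx
      simp only [bLoop, hidx]
      rw [this]
      simp
    | some k =>
      obtain ⟨h1, h2, h3, h4, h5⟩ := hs.2 k hidx
      simp only [bLoop, hidx]
      rw [ih (matched ++ [(k : Int)]) (k + 1) h3, h4, h5]
      have hcast : (c : Int) + ((k - c : Nat) : Int) = (k : Int) := by
        omega
      rw [tIdx_prefix, hcast]
      have hcast2 : ((k + 1 : Nat) : Int) = (k : Int) + 1 := by push_cast; ring
      rw [hcast2]
      by_cases hr : (mf (old_rows.drop (k + 1)) ns).2 = []
      · simp [hr]
      · simp [hr]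

-- complement lemma: filtering range by non-membership in the true positions yields the false positions
theorem filt_compl : ∀ (fs : List Bool) (k : Int) (M : List Int),
    (∀ i : Int, k ≤ i → (M.contains i = true ↔ i ∈ tIdx fs k)) →
    (PySem.List.pyRange k (k + fs.length) 1).filter (fun i => !(M.contains i)) = fIdx fs k := by
  intro fs
  induction fs with
  | nil =>
    intro k M _
    rw [PySem.List.pyRange_one_eq_nil (by simp)]
    simp [fIdx]
  | cons b fs ih =>
    intro k M hM
    have hlt : k < k + ((b :: fs).length : Int) := by simp only [List.length_cons]; push_cast; omega
    rw [PySem.List.pyRange_one_cons hlt]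
    have hend : k + ((b :: fs).length : Int) = (k + 1) + (fs.length : Int) := by
      simp only [List.length_cons]; push_cast; ring
    rw [hend]
    rw [List.filter_cons]
    cases b with
    | true =>
      have hkmem : k ∈ tIdx (true :: fs) k := by simp [tIdx]
      have hck : M.contains k = true := (hM k (le_refl _)).mpr hkmem
      rw [hck, if_neg (by simp)]
      have hf : fIdx (true :: fs) k = fIdx fs (k + 1) := rfl
      rw [hf]
      apply ih
      intro i hi
      rw [hM i (by omega)]
      constructor
      · intro h
        have : i = k ∨ i ∈ tIdx fs (k + 1) := by simpa [tIdx] using h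
        rcases this with h1 | h2
        · omega
        · exact h2
      · intro h
        simp [tIdx]
        right; exact h
    | false =>
      have hknot : M.contains k = false := by
        by_contra hc
        have : M.contains k = true := by
          cases hx : M.contains k
          · exact absurd hx hc
          · rfl
        have hmem : k ∈ tIdx (false :: fs) k := (hM k (le_refl _)).mp this
        have : k ∈ tIdx fs (k + 1) := by simpa [tIdx] using hmem
        have := tIdx_mem_ge fs (k + 1) k this
        omega
      rw [hknot, if_pos (by simp)]
      have hf : fIdx (false :: fs) k = k :: fIdx fs (k + 1) := rfl
      rw [hf]
      congr 1
      apply ih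
      intro i hi
      rw [hM i (by omega)]
      have : tIdx (false :: fs) k = tIdx fs (k + 1) := rfl
      rw [this]

-- ===== VERDICT (by name: the statement is the Claim_ definition above) =====
theorem find_deleted_row_indices_py_spec : Claim_equal_find_deleted_row_indices_py := by
  unfold Claim_equal_find_deleted_row_indices_py
  intro old_rows new_rows _
  unfold Spec_find_deleted_row_indices_py
  have hA := aLoop_eq old_rows new_rows old_rows new_rows 0 0 [] (by omega) rfl (by omega) rfl
  simp only [Int.natCast_zero, List.nil_append] at hA
  have hAe : find_deleted_row_indices_py old_rows new_rows
      = if (mf old_rows new_rows).2 ≠ [] then [] else fIdx (mf old_rows new_rows).1 0 := by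
    unfold find_deleted_row_indices_py
    exact hA
  have hB := bLoop_eq old_rows new_rows [] 0 (by omega)
  simp only [List.drop_zero, Int.natCast_zero, List.nil_append] at hB
  rw [hAe]
  unfold find_deleted_row_indices_py_alt
  rw [hB]
  by_cases hr : (mf old_rows new_rows).2 = []
  · rw [if_neg (by simp [hr]), if_pos hr]
    have hlen : ((mf old_rows new_rows).1.length : Int) = (old_rows.length : Int) := by
      rw [mf_fst_len]
    rw [← hlen]
    have hz : ((old_rows.length : Int)) = 0 + ((mf old_rows new_rows).1.length : Int) := by
      rw [hlen]; ring
    have := filt_compl (mf old_rows new_rows).1 0 (tIdx (mf old_rows new_rows).1 0)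
      (by intro i _; simp)
    simp only [zero_add] at this
    exact this.symm
  · rw [if_pos hr, if_neg hr]
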